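-- pv_equiv track=rewrite | github.com/CyrusBDR/portal_backmiddle | common_lamina_xinf.py | months_ptbr
-- ===== SOURCE A (Python) =====
-- def months_ptbr(string):
--     month_dict = {'January': 'Janeiro',
--                   'February': 'Fevereiro',
--                   'March': 'Março',
--                   'April': 'Abril',
--                   'May': 'Maio',
--                   'June': 'Junho',
--                   'July': 'Julho',
--                   'August': 'Agosto',
--                   'September': 'Setembro',
--                   'October': 'Outubro',
--                   'November': 'Novembro',
--                   'December': 'Dezembro'}
--     for key in month_dict.keys():
--         string = string.replace(key, month_dict[key])
--     return string
-- ===== SOURCE B (Python) =====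
-- def months_ptbr(string):
--     months = [('January', 'Janeiro'), ('February', 'Fevereiro'), ('March', 'Março'),
--               ('April', 'Abril'), ('May', 'Maio'), ('June', 'Junho'), ('July', 'Julho'),
--               ('August', 'Agosto'), ('September', 'Setembro'), ('October', 'Outubro'),
--               ('November', 'Novembro'), ('December', 'Dezembro')]
--     out = []
--     i = 0
--     n = len(string)
--     while i < n:
--         for k, v in months:
--             if string.startswith(k, i):
--                 out.append(v)
--                 i += len(k)
--                 break
--         else:
--             out.append(string[i])
--             i += 1
--     return ''.join(out)
-- ===== Notes on version B (the rewrite author's own statement) =====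
-- stated objective: alternative
-- what changed: A makes twelve sequential whole-string str.replace passes (one per month); B makes a single left-to-right scan that at each position looks for the first matching month key in the table, emits its translation and jumps past it, copying one character otherwise.
import Mathlib
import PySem

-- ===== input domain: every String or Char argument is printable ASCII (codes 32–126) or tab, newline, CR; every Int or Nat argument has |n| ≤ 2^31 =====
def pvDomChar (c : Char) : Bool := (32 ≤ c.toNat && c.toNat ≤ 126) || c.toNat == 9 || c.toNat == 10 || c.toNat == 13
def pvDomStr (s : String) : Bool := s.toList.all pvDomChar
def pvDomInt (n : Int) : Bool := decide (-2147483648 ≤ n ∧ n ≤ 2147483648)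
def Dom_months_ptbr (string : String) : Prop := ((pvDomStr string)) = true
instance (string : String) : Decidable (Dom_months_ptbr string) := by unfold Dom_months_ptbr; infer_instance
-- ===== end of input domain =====

-- B replaces A's twelve sequential whole-string str.replace passes by ONE left-to-right scan with a
-- first-match table lookup (objective: alternative, same observable result; not measured faster).

-- ===== PORT A =====
-- the dict in insertion order, as an association list (type convention)
def monthTable : List (String × String) :=
  [("January", "Janeiro"), ("February", "Fevereiro"), ("March", "Março"),
   ("April", "Abril"), ("May", "Maio"), ("June", "Junho"), ("July", "Julho"),
   ("August", "Agosto"), ("September", "Setembro"), ("October", "Outubro"),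
   ("November", "Novembro"), ("December", "Dezembro")]

-- A: for key in month_dict.keys(): string = string.replace(key, month_dict[key])
def months_ptbr (string : String) : String :=
  monthTable.foldl (fun s kv => PySem.Str.replace s kv.1 kv.2) string

-- ===== PORT B =====
-- B's table over character lists
def pvTable : List (List Char × List Char) :=
  [("January".toList, "Janeiro".toList), ("February".toList, "Fevereiro".toList),
   ("March".toList, "Março".toList), ("April".toList, "Abril".toList),
   ("May".toList, "Maio".toList), ("June".toList, "Junho".toList),
   ("July".toList, "Julho".toList), ("August".toList, "Agosto".toList),
   ("September".toList, "Setembro".toList), ("October".toList, "Outubro".toList),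
   ("November".toList, "Novembro".toList), ("December".toList, "Dezembro".toList)]

-- the inner 'for k, v in months: if string.startswith(k, i): …' of Source B: first matching pair
def findKey (T : List (List Char × List Char)) (l : List Char) : Option (List Char × List Char) :=
  T.find? (fun p => p.1.isPrefixOf l)

-- Source B's while loop: at position i emit v and jump len(k), or copy one char.
-- ('.max 1' only justifies termination; every key of the table Source B uses is nonempty, so it never truncates a jump)
def scanT (T : List (List Char × List Char)) : List Char → List Char
  | [] => []
  | c :: t =>
    match findKey T (c :: t) with
    | some (k, v) => v ++ scanT T ((c :: t).drop (k.length.max 1))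
    | none => c :: scanT T t
termination_by l => l.length
decreasing_by
  all_goals simp [List.length_drop]

def months_ptbr_alt (string : String) : String :=
  String.ofList (scanT pvTable string.toList)

-- ===== PRECONDITION & SPEC =====
def Spec_months_ptbr (string : String) (out : String) : Prop := out = months_ptbr_alt string
instance (string : String) (out : String) : Decidable (Spec_months_ptbr string out) := by unfold Spec_months_ptbr; infer_instance

-- ===== CLAIM (what is proved, stated in full; the proofs are below) =====
def Claim_equal_months_ptbr : Prop := ∀ (string : String), Dom_months_ptbr string → Spec_months_ptbr string (months_ptbr string)

-- ===== LEMMAS AND PROOFS =====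

-- upper-case ASCII letter
def isUp (c : Char) : Bool := 65 ≤ c.toNat && c.toNat ≤ 90

-- a month name / translation: nonempty, upper-case head, no upper-case letter in the tail
def GoodPat (q : List Char) : Prop :=
  q ≠ [] ∧ isUp q.headI = true ∧ ∀ ch ∈ q.tail, isUp ch = false

-- the table facts the scan/replace equivalence rests on
def OkT (T : List (List Char × List Char)) : Prop :=
  (∀ p ∈ T, GoodPat p.1 ∧ GoodPat p.2) ∧
  (∀ p ∈ T, ∀ q ∈ T,
    (¬ p.1 <+: q.2) ∧ (¬ q.2 <+: p.1) ∧ (p.1 ≠ q.1 → ¬ p.1 <+: q.1))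

lemma scanT_nil (T : List (List Char × List Char)) : scanT T [] = [] := by
  rw [scanT.eq_def]

lemma scanT_cons_some {T : List (List Char × List Char)} {c : Char} {t : List Char}
    {k v : List Char} (h : findKey T (c :: t) = some (k, v)) :
    scanT T (c :: t) = v ++ scanT T ((c :: t).drop (k.length.max 1)) := by
  rw [scanT.eq_def]
  simp only []
  rw [h]

lemma scanT_cons_none {T : List (List Char × List Char)} {c : Char} {t : List Char}
    (h : findKey T (c :: t) = none) :
    scanT T (c :: t) = c :: scanT T t := by
  rw [scanT.eq_def]
  simp only []
  rw [h]

-- ---- generic facts about findKey ----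

lemma findKey_mem_of_some {T : List (List Char × List Char)} {l k v : List Char}
    (h : findKey T l = some (k, v)) : (k, v) ∈ T ∧ k <+: l := by
  refine ⟨List.mem_of_find?_eq_some h, ?_⟩
  have := List.find?_some h
  simpa [List.isPrefixOf_iff_prefix] using this

lemma findKey_append (T₁ T₂ : List (List Char × List Char)) (l : List Char) :
    findKey (T₁ ++ T₂) l = (findKey T₁ l).or (findKey T₂ l) := by
  simp [findKey, List.find?_append]

lemma findKey_singleton_pos {k v l : List Char} (h : k <+: l) :
    findKey [(k, v)] l = some (k, v) := by
  have : k.isPrefixOf l = true := List.isPrefixOf_iff_prefix.mpr h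
  simp [findKey, List.find?, this]

lemma findKey_singleton_neg {k v l : List Char} (h : ¬ k <+: l) :
    findKey [(k, v)] l = none := by
  have : k.isPrefixOf l = false := by
    rw [Bool.eq_false_iff]
    intro hc
    exact h (List.isPrefixOf_iff_prefix.mp hc)
  simp [findKey, List.find?, this]

lemma prefix_append_cases {l u x : List Char} (h : l <+: u ++ x) : l <+: u ∨ u <+: l := by
  exact List.prefix_or_prefix_of_prefix h (List.prefix_append u x)

-- ---- the scan walks through a stretch with no match one character at a time ----

lemma scanT_walk (T : List (List Char × List Char)) :
    ∀ (u r : List Char), (∀ j, j < u.length → findKey T (u.drop j ++ r) = none) →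
      scanT T (u ++ r) = u ++ scanT T r := by
  intro u
  induction u with
  | nil => intro r _; simp
  | cons c w ih =>
    intro r h
    have h0 : findKey T (c :: (w ++ r)) = none := by
      have := h 0 (by simp)
      simpa using this
    rw [List.cons_append, scanT_cons_none h0, ih r (fun j hj => by
      have := h (j + 1) (by simp; omega)
      simpa using this), List.cons_append]

-- ---- no all-lower-case pattern appears at the head of a scan output unless it was there before ----

lemma lemQ (T : List (List Char × List Char)) (hT : ∀ pr ∈ T, GoodPat pr.2) :
    ∀ (n : Nat) (s p : List Char), s.length ≤ n → p ≠ [] →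
      (∀ ch ∈ p, isUp ch = false) → ¬ p <+: s → ¬ p <+: scanT T s := by
  intro n
  induction n with
  | zero =>
    intro s p hs hp _ hnp
    have : s = [] := by
      cases s with
      | nil => rfl
      | cons c t => simp at hs
    subst this
    rw [scanT_nil]
    simpa [List.prefix_nil] using hp
  | succ n ih =>
    intro s p hs hp hlow hnp
    cases s with
    | nil =>
      rw [scanT_nil]
      simpa [List.prefix_nil] using hp
    | cons c t =>
      cases hfk : findKey T (c :: t) with
      | some kv =>
        obtain ⟨k, v⟩ := kv
        rw [scanT_cons_some hfk]
        obtain ⟨hmem, _⟩ := findKey_mem_of_some hfk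
        obtain ⟨hvne, hvup, _⟩ := hT (k, v) hmem
        intro hpre
        cases p with
        | nil => exact hp rfl
        | cons ph pt =>
          cases v with
          | nil => exact hvne rfl
          | cons vh vt =>
            rw [List.cons_append] at hpre
            obtain ⟨hh, _⟩ := List.cons_prefix_cons.mp hpre
            have h1 : isUp ph = false := hlow ph (by simp)
            have h2 : isUp vh = true := by simpa using hvup
            rw [hh, h2] at h1
            simp at h1
      | none =>
        rw [scanT_cons_none hfk]
        intro hpre
        cases p with
        | nil => exact hp rfl
        | cons ph pt =>
          obtain ⟨hh, hpt⟩ := List.cons_prefix_cons.mp hpre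
          cases pt with
          | nil =>
            subst hh
            exact hnp (List.cons_prefix_cons.mpr ⟨rfl, List.nil_prefix⟩)
          | cons q1 qt =>
            have hnt : ¬ (q1 :: qt) <+: t := by
              intro hc
              exact hnp (by subst hh; exact List.cons_prefix_cons.mpr ⟨rfl, hc⟩)
            exact ih t (q1 :: qt) (by simp at hs ⊢; omega) (by simp)
              (fun ch hch => hlow ch (by simp [hch])) hnt hpt

-- ---- a month key absent from s stays absent from the scan output ----

lemma lemP (T : List (List Char × List Char)) (hT : ∀ pr ∈ T, GoodPat pr.2)
    (q : List Char) (hq : GoodPat q)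
    (hd : ∀ pr ∈ T, ¬ q <+: pr.2 ∧ ¬ pr.2 <+: q) :
    ∀ (s : List Char), ¬ q <+: s → ¬ q <+: scanT T s := by
  intro s hnq
  obtain ⟨hqne, hqup, hqtail⟩ := hq
  cases s with
  | nil =>
    rw [scanT_nil]
    simpa [List.prefix_nil] using hqne
  | cons c t =>
    cases hfk : findKey T (c :: t) with
    | some kv =>
      obtain ⟨k, v⟩ := kv
      rw [scanT_cons_some hfk]
      obtain ⟨hmem, _⟩ := findKey_mem_of_some hfk
      intro hpre
      rcases prefix_append_cases hpre with h | h
      · exact (hd (k, v) hmem).1 h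
      · exact (hd (k, v) hmem).2 h
    | none =>
      rw [scanT_cons_none hfk]
      intro hpre
      cases q with
      | nil => exact hqne rfl
      | cons qh qt =>
        obtain ⟨hh, hqt⟩ := List.cons_prefix_cons.mp hpre
        cases qt with
        | nil =>
          subst hh
          exact hnq (List.cons_prefix_cons.mpr ⟨rfl, List.nil_prefix⟩)
        | cons q1 qt' =>
          have hnt : ¬ (q1 :: qt') <+: t := by
            intro hc
            exact hnq (by subst hh; exact List.cons_prefix_cons.mpr ⟨rfl, hc⟩)
          exact lemQ T hT t.length t (q1 :: qt') le_rfl (by simp)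
            (fun ch hch => hqtail ch (by simpa using hch)) hnt hqt

-- ---- no key can match at a position holding a lower-case character ----

lemma findKey_none_of_head_low {T : List (List Char × List Char)}
    (hTk : ∀ pr ∈ T, GoodPat pr.1) {ch : Char} {l : List Char}
    (hch : isUp ch = false) : findKey T (ch :: l) = none := by
  rw [findKey, List.find?_eq_none]
  intro p hp
  obtain ⟨hne, hup, _⟩ := hTk p hp
  intro hc
  have hpre := List.isPrefixOf_iff_prefix.mp hc
  cases hk : p.1 with
  | nil => exact hne hk
  | cons k1 kt =>
    rw [hk] at hpre
    obtain ⟨hh, _⟩ := List.cons_prefix_cons.mp hpre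
    rw [hk, hh] at hup
    simp [hch] at hup

lemma getElem_succ_mem_tail {α : Type} (l : List α) (j : Nat) (h : j + 1 < l.length) :
    l[j + 1] ∈ l.tail := by
  cases l with
  | nil => simp at h
  | cons a t =>
    simp only [List.getElem_cons_succ, List.tail_cons]
    exact List.getElem_mem _

-- ---- one more sequential replace pass = one more key in the scan table ----

lemma mainStep (T : List (List Char × List Char)) (k v : List Char)
    (hok : OkT (T ++ [(k, v)])) :
    ∀ (n : Nat) (s : List Char), s.length ≤ n →
      scanT [(k, v)] (scanT T s) = scanT (T ++ [(k, v)]) s := by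
  obtain ⟨hgood, hpair⟩ := hok
  have hmemkv : (k, v) ∈ T ++ [(k, v)] := by simp
  have hkgood : GoodPat k := (hgood (k, v) hmemkv).1
  have hTgood2 : ∀ pr ∈ T, GoodPat pr.2 := fun pr hpr =>
    (hgood pr (by simp [hpr])).2
  have hTgood1 : ∀ pr ∈ T, GoodPat pr.1 := fun pr hpr =>
    (hgood pr (by simp [hpr])).1
  have hd : ∀ pr ∈ T, ¬ k <+: pr.2 ∧ ¬ pr.2 <+: k := fun pr hpr => by
    have := hpair (k, v) hmemkv pr (by simp [hpr])
    exact ⟨this.1, this.2.1⟩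
  intro n
  induction n with
  | zero =>
    intro s hs
    have : s = [] := by
      cases s with
      | nil => rfl
      | cons c t => simp at hs
    subst this
    rw [scanT_nil, scanT_nil, scanT_nil]
  | succ n ih =>
    intro s hs
    cases s with
    | nil => rw [scanT_nil, scanT_nil, scanT_nil]
    | cons c t =>
      cases hfk : findKey T (c :: t) with
      | some kv' =>
        obtain ⟨k', v'⟩ := kv'
        obtain ⟨hmem', hpfx'⟩ := findKey_mem_of_some hfk
        have hk'good : GoodPat k' := (hgood (k', v') (by simp [hmem'])).1
        have hv'good : GoodPat v' := (hgood (k', v') (by simp [hmem'])).2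
        rw [scanT_cons_some hfk]
        have hcomm : scanT [(k, v)] (v' ++ scanT T ((c :: t).drop (k'.length.max 1)))
            = v' ++ scanT [(k, v)] (scanT T ((c :: t).drop (k'.length.max 1))) := by
          apply scanT_walk
          intro j hj
          cases j with
          | zero =>
            apply findKey_singleton_neg
            intro hc
            simp at hc
            rcases prefix_append_cases hc with h | h
            · exact (hd (k', v') hmem').1 h
            · exact (hd (k', v') hmem').2 h
          | succ j =>
            have hdrop : v'.drop (j + 1) = v'[j + 1] :: v'.drop (j + 2) :=
              List.drop_eq_getElem_cons hj
            rw [hdrop, List.cons_append]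
            apply findKey_none_of_head_low (fun pr hpr => by
              simp at hpr
              subst hpr
              exact hkgood)
            obtain ⟨hvne, hvup, hvtail⟩ := hv'good
            exact hvtail _ (getElem_succ_mem_tail v' j hj)
        rw [hcomm]
        have hlen : ((c :: t).drop (k'.length.max 1)).length ≤ n := by
          have h1 : 1 ≤ k'.length.max 1 := Nat.le_max_right _ _
          simp only [List.length_drop, List.length_cons] at hs ⊢
          omega
        rw [ih _ hlen]
        have hfk' : findKey (T ++ [(k, v)]) (c :: t) = some (k', v') := by
          rw [findKey_append, hfk]
          rfl
        rw [scanT_cons_some hfk']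
      | none =>
        by_cases hk : k <+: (c :: t)
        · obtain ⟨r, hr⟩ := hk
          have hwalk : scanT T (k ++ r) = k ++ scanT T r := by
            apply scanT_walk
            intro j hj
            cases j with
            | zero =>
              simpa [hr] using hfk
            | succ j =>
              have hdrop : k.drop (j + 1) = k[j + 1] :: k.drop (j + 2) :=
                List.drop_eq_getElem_cons hj
              rw [hdrop, List.cons_append]
              apply findKey_none_of_head_low hTgood1
              obtain ⟨hkne, hkup, hktail⟩ := hkgood
              exact hktail _ (getElem_succ_mem_tail k j hj)
          have hrlen : r.length ≤ n := by
            have hlr := congrArg List.length hr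
            obtain ⟨hkne, _, _⟩ := hkgood
            have hkpos : 0 < k.length := List.length_pos_iff.mpr hkne
            simp at hlr hs
            omega
          obtain ⟨hkne, _, _⟩ := hkgood
          have hkpos : 0 < k.length := List.length_pos_iff.mpr hkne
          have hmax : k.length.max 1 = k.length := Nat.max_eq_left hkpos
          rw [← hr] at hfk ⊢
          rw [hwalk]
          have hL : scanT [(k, v)] (k ++ scanT T r) = v ++ scanT [(k, v)] (scanT T r) := by
            have hsome : findKey [(k, v)] (k ++ scanT T r) = some (k, v) :=
              findKey_singleton_pos (List.prefix_append k _)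
            cases hkk : k with
            | nil => exact absurd hkk hkne
            | cons kh kt =>
              rw [hkk, List.cons_append] at hsome
              rw [List.cons_append, scanT_cons_some hsome, ← List.cons_append, ← hkk, hmax, List.drop_left]
          rw [hL, ih r hrlen]
          have hfk'' : findKey (T ++ [(k, v)]) (k ++ r) = some (k, v) := by
            rw [findKey_append, hfk, Option.none_or]
            exact findKey_singleton_pos (List.prefix_append k r)
          cases hkk : k with
          | nil => exact absurd hkk hkne
          | cons kh kt =>
            rw [hkk, List.cons_append] at hfk''
            rw [List.cons_append, scanT_cons_some hfk'', ← List.cons_append, ← hkk, hmax, List.drop_left]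
        · have hnotk : ¬ k <+: scanT T (c :: t) := lemP T hTgood2 k hkgood hd (c :: t) hk
          rw [scanT_cons_none hfk] at hnotk ⊢
          rw [scanT_cons_none (findKey_singleton_neg hnotk)]
          rw [ih t (by simp at hs; omega)]
          have hfk' : findKey (T ++ [(k, v)]) (c :: t) = none := by
            rw [findKey_append, hfk, Option.none_or]
            exact findKey_singleton_neg hk
          rw [scanT_cons_none hfk']

-- ---- executable check of the table facts ----

def goodPatB (q : List Char) : Bool :=
  !q.isEmpty && isUp q.headI && q.tail.all (fun ch => !isUp ch)

def okTB (T : List (List Char × List Char)) : Bool :=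
  T.all (fun p => goodPatB p.1 && goodPatB p.2) &&
  T.all (fun p => T.all (fun q =>
    !p.1.isPrefixOf q.2 && !q.2.isPrefixOf p.1 && (p.1 == q.1 || !p.1.isPrefixOf q.1)))

lemma GoodPat_of_goodPatB {q : List Char} (h : goodPatB q = true) : GoodPat q := by
  simp only [goodPatB, Bool.and_eq_true, Bool.not_eq_true', List.isEmpty_eq_false_iff,
    List.all_eq_true] at h
  exact ⟨h.1.1, h.1.2, fun ch hch => by simpa using h.2 ch hch⟩

lemma OkT_of_okTB {T : List (List Char × List Char)} (h : okTB T = true) : OkT T := by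
  simp only [okTB, Bool.and_eq_true, List.all_eq_true] at h
  obtain ⟨h1, h2⟩ := h
  constructor
  · intro p hp
    have := h1 p hp
    exact ⟨GoodPat_of_goodPatB this.1, GoodPat_of_goodPatB this.2⟩
  · intro p hp q hq
    have h3 := h2 p hp q hq
    simp only [Bool.not_eq_true', Bool.or_eq_true, beq_iff_eq] at h3
    refine ⟨?_, ?_, ?_⟩
    · intro hc
      have h' := List.isPrefixOf_iff_prefix.mpr hc
      rw [h3.1.1] at h'
      simp at h'
    · intro hc
      have h' := List.isPrefixOf_iff_prefix.mpr hc
      rw [h3.1.2] at h'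
      simp at h'
    · intro hne hc
      rcases h3.2 with h' | h'
      · exact hne h'
      · have h'' := List.isPrefixOf_iff_prefix.mpr hc
        rw [h'] at h''
        simp at h''

-- ---- the empty table scan is the identity ----

lemma scanT_empty : ∀ s : List Char, scanT [] s = s
  | [] => scanT_nil _
  | c :: t => by
    rw [scanT_cons_none (by simp [findKey]), scanT_empty t]

lemma OkT_mono {T : List (List Char × List Char)} {p : List Char × List Char}
    (h : OkT (T ++ [p])) : OkT T :=
  ⟨fun q hq => h.1 q (by simp [hq]),
   fun q hq q' hq' => h.2 q (by simp [hq]) q' (by simp [hq'])⟩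

-- ---- the sequence of single-key passes collapses into one multi-key scan ----

lemma chain : ∀ (T : List (List Char × List Char)), OkT T →
    ∀ s : List Char, T.foldl (fun acc p => scanT [(p.1, p.2)] acc) s = scanT T s := by
  intro T
  induction T using List.reverseRecOn with
  | nil =>
    intro _ s
    rw [scanT_empty]
    rfl
  | append_singleton T p ihT =>
    intro hok s
    obtain ⟨k, v⟩ := p
    rw [List.foldl_append]
    simp only [List.foldl_cons, List.foldl_nil]
    rw [ihT (OkT_mono hok) s, mainStep T k v hok s.length s le_rfl]

-- ---- Python's str.replace (one key) IS the single-key scan ----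

lemma go_eq (k v : List Char) (hk : k ≠ []) :
    ∀ (fuel : Nat) (s acc : List Char), s.length ≤ fuel →
      PySem.Chars.replace.go k v fuel s acc = acc.reverse ++ scanT [(k, v)] s := by
  have hkpos : 0 < k.length := List.length_pos_iff.mpr hk
  have hmax : k.length.max 1 = k.length := Nat.max_eq_left hkpos
  intro fuel
  induction fuel with
  | zero =>
    intro s acc hs
    have : s = [] := by
      cases s with
      | nil => rfl
      | cons c t => simp at hs
    subst this
    rw [scanT_nil]
    simp [PySem.Chars.replace.go]
  | succ n ih =>
    intro s acc hs
    cases s with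
    | nil =>
      rw [scanT_nil]
      simp [PySem.Chars.replace.go]
    | cons c t =>
      have hunf : PySem.Chars.replace.go k v (n + 1) (c :: t) acc
          = if k.isPrefixOf (c :: t) then
              PySem.Chars.replace.go k v n ((c :: t).drop k.length) (v.reverse ++ acc)
            else PySem.Chars.replace.go k v n t (c :: acc) := by
        simp [PySem.Chars.replace.go]
      rw [hunf]
      by_cases hp : k <+: (c :: t)
      · rw [if_pos (List.isPrefixOf_iff_prefix.mpr hp)]
        rw [ih ((c :: t).drop k.length) (v.reverse ++ acc) (by
          simp only [List.length_drop, List.length_cons] at hs ⊢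
          omega)]
        rw [scanT_cons_some (findKey_singleton_pos hp), hmax]
        simp [List.append_assoc]
      · rw [if_neg (fun hc => hp (List.isPrefixOf_iff_prefix.mp hc))]
        rw [ih t (c :: acc) (by simp at hs; omega)]
        rw [scanT_cons_none (findKey_singleton_neg hp)]
        simp

lemma replace_eq (s k v : List Char) (hk : k ≠ []) :
    PySem.Chars.replace s k v = scanT [(k, v)] s := by
  have hke : k.isEmpty = false := by
    cases k with
    | nil => exact absurd rfl hk
    | cons a l => rfl
  rw [PySem.Chars.replace, hke]
  simpa using go_eq k v hk s.length s [] le_rfl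

-- ---- string-level fold to character-level fold ----

lemma lift (L : List (String × String)) :
    ∀ s : String, (L.foldl (fun s kv => PySem.Str.replace s kv.1 kv.2) s).toList
      = (L.map (fun kv => (kv.1.toList, kv.2.toList))).foldl
          (fun acc p => PySem.Chars.replace acc p.1 p.2) s.toList := by
  induction L with
  | nil => intro s; simp
  | cons p L ih =>
    intro s
    simp only [List.foldl_cons, List.map_cons]
    rw [ih, PySem.Str.toList_replace]

-- ---- assembly ----

theorem months_ptbr_spec : Claim_equal_months_ptbr := by
  intro s _
  show months_ptbr s = months_ptbr_alt s
  have hmap : monthTable.map (fun kv => (kv.1.toList, kv.2.toList)) = pvTable := by decide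
  have h1 : (months_ptbr s).toList
      = pvTable.foldl (fun acc p => PySem.Chars.replace acc p.1 p.2) s.toList := by
    rw [months_ptbr, lift, hmap]
  have hne : ∀ p ∈ pvTable, p.1 ≠ [] := by decide
  have h2 : pvTable.foldl (fun acc p => PySem.Chars.replace acc p.1 p.2) s.toList
      = pvTable.foldl (fun acc p => scanT [(p.1, p.2)] acc) s.toList :=
    PySem.List.foldl_congr_mem _ _ _ _ (fun acc p hp => replace_eq acc p.1 p.2 (hne p hp))
  have hok : OkT pvTable := OkT_of_okTB (by decide)
  calc months_ptbr s
      = String.ofList (months_ptbr s).toList := String.ofList_toList.symm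
    _ = String.ofList (scanT pvTable s.toList) := by
        rw [h1, h2, chain pvTable hok s.toList]
    _ = months_ptbr_alt s := rfl
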